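-- pv_equiv track=rewrite | github.com/RasmitDevkota/TSSORunItCodeIt2022 | program.py | nand
-- ===== SOURCE A (Python) =====
-- def nand(string):
--     bitstrings = string.split(" ")
--
--     if len(bitstrings[0]) >= 128 or len(bitstrings[1]) >= 128:
--         return "Please enter two space-separated bitstrings of length < 128!"
--
--     if bitstrings[0].isdigit() and bitstrings[1].isdigit() and len(bitstrings[0]) == len(bitstrings[1]):
--         nand_result = ""
--
--         for i in range(len(bitstrings[0])):
--             bit1str = bitstrings[0][i]
--             bit2str = bitstrings[1][i]
--
--             if bit1str in ["0", "1"] and bit2str in ["0", "1"]: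
--                 bit1 = 1 if bit1str == "1" else 0
--                 bit2 = 1 if bit2str == "1" else 0
--             else:
--                 return "Please enter two space-separated bitstrings!"
--
--             nand_result += str(not (bit1 & bit2))
--
--         return nand_result.replace("True", "1").replace("False", "0")
--     else:
--         return "Please enter two space-separated bitstrings!"
-- ===== SOURCE B (Python) =====
-- def nand(string):
--     parts = string.split(" ")
--     first, second = parts[0], parts[1]
--     if len(first) >= 128 or len(second) >= 128:
--         return "Please enter two space-separated bitstrings of length < 128!"
--     if not (first.isdigit() and second.isdigit() and len(first) == len(second)):
--         return "Please enter two space-separated bitstrings!"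
--     if not all(c in "01" for c in first + second):
--         return "Please enter two space-separated bitstrings!"
--     x = 0
--     y = 0
--     for c in first:
--         x = 2 * x + (c == "1")
--     for c in second:
--         y = 2 * y + (c == "1")
--     n = len(first)
--     r = ~(x & y) & ((1 << n) - 1)
--     return bin(r)[2:].zfill(n)
-- ===== Notes on version B (the rewrite author's own statement) =====
-- stated objective: alternative
-- what changed: A builds the result with a per-index character loop that appends 'True'/'False' text blocks and then fixes the string with two str.replace passes; B converts each bitstring to an integer once and computes the whole NAND as one masked bitwise operation ~(x & y) & ((1<<n)-1), formatted back with bin()/zfill.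
import Mathlib
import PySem

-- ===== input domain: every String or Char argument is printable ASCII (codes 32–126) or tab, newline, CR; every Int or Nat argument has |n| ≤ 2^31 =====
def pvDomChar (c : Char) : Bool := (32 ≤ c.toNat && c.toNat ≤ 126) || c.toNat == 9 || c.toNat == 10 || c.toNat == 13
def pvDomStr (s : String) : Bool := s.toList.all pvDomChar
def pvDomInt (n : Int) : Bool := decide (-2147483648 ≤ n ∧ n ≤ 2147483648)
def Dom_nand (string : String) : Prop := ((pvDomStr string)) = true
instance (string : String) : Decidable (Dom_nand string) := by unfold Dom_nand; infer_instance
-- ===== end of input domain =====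

-- B replaces A's per-position character loop (building "True"/"False" blocks and fixing
-- them up with two str.replace passes) by converting each bitstring to an integer once and
-- computing the whole NAND as a single masked bitwise operation ~(x & y) & ((1<<n)-1),
-- formatted back with zfill; objective: alternative (a genuinely different algorithm).

-- ===== PORT A =====
-- the loop 'for i in range(len(bitstrings[0])): …' with its early return
-- (none = the early return "Please enter two space-separated bitstrings!");
-- indices produced by pyRange are always in range, so the .getD ' ' default is never used
def nandLoop (b0 b1 : List Char) : List Int → List Char → Option (List Char)
  | [], acc => some acc
  | i :: rest, acc =>
    let bit1str := (PySem.List.pyGet? b0 i).getD ' '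
    let bit2str := (PySem.List.pyGet? b1 i).getD ' '
    if (bit1str = '0' ∨ bit1str = '1') ∧ (bit2str = '0' ∨ bit2str = '1') then
      let bit1 : Int := if bit1str = '1' then 1 else 0
      let bit2 : Int := if bit2str = '1' then 1 else 0
      -- str(not (bit1 & bit2)) appends "True" iff bit1 & bit2 == 0
      nandLoop b0 b1 rest
        (acc ++ (if PySem.Int.band bit1 bit2 = 0 then ['T', 'r', 'u', 'e'] else ['F', 'a', 'l', 's', 'e']))
    else none

def nand (string : String) : String :=
  let bitstrings := PySem.Chars.splitOn string.toList [' ']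
  -- bitstrings[0] / bitstrings[1]; Python raises IndexError when there is no space
  -- (fewer than two pieces) — those inputs are excluded by Pre_nand, the .getD [] is never used there
  let b0 := (PySem.List.pyGet? bitstrings 0).getD []
  let b1 := (PySem.List.pyGet? bitstrings 1).getD []
  if 128 ≤ b0.length ∨ 128 ≤ b1.length then
    "Please enter two space-separated bitstrings of length < 128!"
  else if PySem.Chars.strIsdigit b0 && PySem.Chars.strIsdigit b1 && (b0.length == b1.length) then
    match nandLoop b0 b1 (PySem.List.pyRange 0 b0.length) [] with
    | some acc =>
        String.mk (PySem.Chars.replace (PySem.Chars.replace acc ['T', 'r', 'u', 'e'] ['1'])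
          ['F', 'a', 'l', 's', 'e'] ['0'])
    | none => "Please enter two space-separated bitstrings!"
  else "Please enter two space-separated bitstrings!"

-- ===== PORT B =====
-- bin(x) without the '0b' prefix, for x ≥ 0 (Source B only applies it to r ≥ 0): minimal binary digits
def binChars (x : Nat) : List Char :=
  if h : x = 0 then [] else binChars (x / 2) ++ [if x % 2 = 1 then '1' else '0']
decreasing_by exact Nat.div_lt_self (Nat.pos_of_ne_zero h) one_lt_two

def pyBin (x : Nat) : List Char := if x = 0 then ['0'] else binChars x

def nand_alt (string : String) : String :=
  let parts := PySem.Chars.splitOn string.toList [' ']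
  -- parts[0] / parts[1]: B raises like A when there is no space; excluded by Pre_nand
  let first := (PySem.List.pyGet? parts 0).getD []
  let second := (PySem.List.pyGet? parts 1).getD []
  if 128 ≤ first.length ∨ 128 ≤ second.length then
    "Please enter two space-separated bitstrings of length < 128!"
  else if !(PySem.Chars.strIsdigit first && PySem.Chars.strIsdigit second
      && (first.length == second.length)) then
    "Please enter two space-separated bitstrings!"
  -- all(c in "01" for c in first + second)
  else if !((first ++ second).all (fun c => ['0', '1'].contains c)) then
    "Please enter two space-separated bitstrings!"
  else
    let x := first.foldl (fun v c => 2 * v + (if c = '1' then (1 : Int) else 0)) 0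
    let y := second.foldl (fun v c => 2 * v + (if c = '1' then (1 : Int) else 0)) 0
    let n := first.length
    let r := PySem.Int.band (Int.not (PySem.Int.band x y)) ((1 <<< n) - 1)
    -- bin(r)[2:].zfill(n); r ≥ 0 always holds here
    String.mk (PySem.Chars.zfill (pyBin r.toNat) (n : Int))

-- ===== PRECONDITION & SPEC =====
-- Pre_nand excludes exactly the strings without a space: there string.split(" ") has a single
-- piece and Python raises IndexError at bitstrings[1] (A returns on every other input).
def Pre_nand (string : String) : Prop :=
  2 ≤ (PySem.Chars.splitOn string.toList [' ']).length
instance (string : String) : Decidable (Pre_nand string) := by unfold Pre_nand; infer_instance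

def pvWitness_nand : String := "0110 1010"

def Spec_nand (string : String) (out : String) : Prop := out = nand_alt string
instance (string : String) (out : String) : Decidable (Spec_nand string out) := by
  unfold Spec_nand; infer_instance

-- ===== CLAIM (what is proved, stated in full; the proofs are below) =====
def Claim_equal_nand : Prop :=
  ∀ (string : String), Dom_nand string → Pre_nand string → Spec_nand string (nand string)

-- ===== LEMMAS AND PROOFS =====

-- abbreviations used only by the proofs
def blkTF : Bool → List Char
  | true => ['T', 'r', 'u', 'e']
  | false => ['F', 'a', 'l', 's', 'e']
def blk1 : Bool → List Char
  | true => ['1']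
  | false => ['F', 'a', 'l', 's', 'e']
def bitChar : Bool → Char
  | true => '1'
  | false => '0'
def nbL (a b : List Char) : List Bool := List.zipWith (fun c d => !(c == '1' && d == '1')) a b
def valB (bs : List Bool) : Nat := bs.foldl (fun v b => 2 * v + cond b 1 0) 0

-- ---- Chars.replace.go step lemmas ----
theorem go_nil (old new : List Char) (fuel : Nat) (acc : List Char) :
    PySem.Chars.replace.go old new fuel [] acc = acc.reverse := by
  cases fuel <;> simp [PySem.Chars.replace.go]

theorem go_prefix (old new : List Char) (fuel : Nat) (c : Char) (t acc : List Char)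
    (h : old.isPrefixOf (c :: t) = true) :
    PySem.Chars.replace.go old new (fuel + 1) (c :: t) acc
      = PySem.Chars.replace.go old new fuel (List.drop old.length (c :: t))
          (new.reverse ++ acc) := by
  simp [PySem.Chars.replace.go, h]

theorem go_step (old new : List Char) (fuel : Nat) (c : Char) (t acc : List Char)
    (h : old.isPrefixOf (c :: t) = false) :
    PySem.Chars.replace.go old new (fuel + 1) (c :: t) acc
      = PySem.Chars.replace.go old new fuel t (c :: acc) := by
  simp [PySem.Chars.replace.go, h]

theorem goTrue (bs : List Bool) : ∀ (fuel : Nat) (acc : List Char),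
    (bs.flatMap blkTF).length ≤ fuel →
    PySem.Chars.replace.go ['T', 'r', 'u', 'e'] ['1'] fuel (bs.flatMap blkTF) acc
      = acc.reverse ++ bs.flatMap blk1 := by
  induction bs with
  | nil => intro fuel acc _; simp [go_nil]
  | cons b bs ih =>
    intro fuel acc hf
    cases b
    · -- false: five mismatching characters
      simp only [List.flatMap_cons, blkTF, List.append_assoc] at hf ⊢
      simp only [List.length_append, List.length_cons] at hf
      obtain ⟨f, rfl⟩ : ∃ f, fuel = f + 5 := ⟨fuel - 5, by omega⟩
      rw [show f + 5 = (((f+1)+1)+1)+1+1 from rfl]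
      simp only [List.cons_append, List.nil_append]
      rw [go_step _ _ _ _ _ _ (by simp [List.isPrefixOf]),
          go_step _ _ _ _ _ _ (by simp [List.isPrefixOf]),
          go_step _ _ _ _ _ _ (by simp [List.isPrefixOf]),
          go_step _ _ _ _ _ _ (by simp [List.isPrefixOf]),
          go_step _ _ _ _ _ _ (by simp [List.isPrefixOf])]
      rw [ih f _ (by simp only [List.length_nil] at hf; omega)]
      simp [blk1]
    · -- true: the block is exactly the pattern
      simp only [List.flatMap_cons, blkTF, List.append_assoc] at hf ⊢
      simp only [List.length_append, List.length_cons] at hf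
      obtain ⟨f, rfl⟩ : ∃ f, fuel = f + 1 := ⟨fuel - 1, by omega⟩
      simp only [List.cons_append, List.nil_append]
      rw [go_prefix _ _ _ _ _ _ (by simp [List.isPrefixOf])]
      simp only [List.length_cons, List.length_nil, List.drop_succ_cons, List.drop_zero]
      rw [ih f _ (by simp only [List.length_nil] at hf; omega)]
      simp [blk1]

theorem replace_true (bs : List Bool) :
    PySem.Chars.replace (bs.flatMap blkTF) ['T', 'r', 'u', 'e'] ['1'] = bs.flatMap blk1 := by
  rw [PySem.Chars.replace]
  simp only [List.isEmpty_cons, if_false, Bool.false_eq_true]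
  simpa using goTrue bs _ [] le_rfl

theorem goFalse (bs : List Bool) : ∀ (fuel : Nat) (acc : List Char),
    (bs.flatMap blk1).length ≤ fuel →
    PySem.Chars.replace.go ['F', 'a', 'l', 's', 'e'] ['0'] fuel (bs.flatMap blk1) acc
      = acc.reverse ++ bs.map bitChar := by
  induction bs with
  | nil => intro fuel acc _; simp [go_nil]
  | cons b bs ih =>
    intro fuel acc hf
    cases b
    · -- false: the block is exactly the pattern
      simp only [List.flatMap_cons, blk1] at hf ⊢
      simp only [List.length_append, List.length_cons, List.length_nil] at hf
      obtain ⟨f, rfl⟩ : ∃ f, fuel = f + 1 := ⟨fuel - 1, by omega⟩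
      simp only [List.cons_append, List.nil_append]
      rw [go_prefix _ _ _ _ _ _ (by simp [List.isPrefixOf])]
      simp only [List.length_cons, List.length_nil, List.drop_succ_cons, List.drop_zero]
      rw [ih f _ (by omega)]
      simp [bitChar]
    · -- true: single mismatching character '1'
      simp only [List.flatMap_cons, blk1] at hf ⊢
      simp only [List.length_append, List.length_cons, List.length_nil] at hf
      obtain ⟨f, rfl⟩ : ∃ f, fuel = f + 1 := ⟨fuel - 1, by omega⟩
      simp only [List.cons_append, List.nil_append]
      rw [go_step _ _ _ _ _ _ (by simp [List.isPrefixOf])]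
      rw [ih f _ (by omega)]
      simp [bitChar]

theorem replace_false (bs : List Bool) :
    PySem.Chars.replace (bs.flatMap blk1) ['F', 'a', 'l', 's', 'e'] ['0'] = bs.map bitChar := by
  rw [PySem.Chars.replace]
  simp only [List.isEmpty_cons, if_false, Bool.false_eq_true]
  simpa using goFalse bs _ [] le_rfl

theorem valB_append (bs : List Bool) (b : Bool) :
    valB (bs ++ [b]) = 2 * valB bs + cond b 1 0 := by
  simp [valB, List.foldl_append]

theorem valB_lt (bs : List Bool) : valB bs < 2 ^ bs.length := by
  induction bs using List.reverseRecOn with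
  | nil => simp [valB]
  | append_singleton bs b ih =>
    rw [valB_append]
    simp only [List.length_append, List.length_cons, List.length_nil, pow_succ]
    cases b <;> simp <;> omega

theorem valB_eq_zero (bs : List Bool) : valB bs = 0 ↔ ∀ b ∈ bs, b = false := by
  induction bs using List.reverseRecOn with
  | nil => simp [valB]
  | append_singleton bs b ih =>
    rw [valB_append]
    cases b <;> simp [ih] <;> intro h <;> omega

theorem bit_eq (b : Bool) (n : Nat) : 2 * n + cond b 1 0 = Nat.bit b n := by
  cases b <;> simp [Nat.bit] <;> omega

theorem valB_land (bs : List Bool) : ∀ (ds : List Bool), ds.length = bs.length →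
    valB bs &&& valB ds = valB (List.zipWith and bs ds) := by
  induction bs using List.reverseRecOn with
  | nil => intro ds h; simp at h; simp [h, valB]
  | append_singleton bs b ih =>
    intro ds h
    rcases List.eq_nil_or_concat ds with rfl | ⟨ds', d, rfl⟩
    · simp at h
    · simp only [List.concat_eq_append] at h ⊢
      simp only [List.length_append, List.length_cons, List.length_nil] at h
      rw [valB_append, valB_append, bit_eq, bit_eq, Nat.land_bit,
        List.zipWith_append (by omega)]
      simp only [List.zipWith_cons_cons, List.zipWith_nil_left]
      rw [valB_append, bit_eq, ih ds' (by omega)]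

theorem valB_not (bs : List Bool) :
    valB (bs.map not) = 2 ^ bs.length - 1 - valB bs := by
  induction bs using List.reverseRecOn with
  | nil => simp [valB]
  | append_singleton bs b ih =>
    have h1 := valB_lt bs
    rw [List.map_append, valB_append]
    simp only [List.map_cons, List.map_nil, valB_append, List.length_append,
      List.length_cons, List.length_nil, pow_succ] at *
    cases b <;> simp at * <;> omega

theorem foldl_int (cs : List Char) : ∀ (v : Nat),
    cs.foldl (fun v c => 2 * v + (if c = '1' then (1 : Int) else 0)) (v : Int)
      = ((cs.map (· == '1')).foldl (fun v b => 2 * v + cond b 1 0) v : Nat) := by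
  induction cs with
  | nil => intro v; simp
  | cons c cs ih =>
    intro v
    simp only [List.foldl_cons, List.map_cons]
    by_cases hc : c = '1'
    · rw [if_pos hc, show (c == '1') = true by simp [hc]]
      rw [show (2 * (v : Int) + 1) = ((2 * v + 1 : Nat) : Int) by push_cast; ring]
      rw [ih (2 * v + 1)]; rfl
    · rw [if_neg hc, show (c == '1') = false by simp [hc]]
      rw [show (2 * (v : Int) + 0) = ((2 * v + 0 : Nat) : Int) by push_cast; ring]
      rw [ih (2 * v + 0)]; rfl

theorem band_not_mask (p m : Nat) :
    PySem.Int.band (Int.not (p : Int)) (m : Int) = ((m - (m &&& p) : Nat) : Int) := by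
  have h1 : Int.not (p : Int) = Int.negSucc p := rfl
  rw [h1, PySem.Int.band]
  have h2 : ¬ (0 : Int) ≤ Int.negSucc p := by exact of_decide_eq_false rfl
  rw [if_neg h2, if_pos (by positivity)]
  congr 1
  simp [Int.negSucc_eq]

theorem binChars_eq (bs : List Bool) (h : valB bs ≠ 0) :
    binChars (valB bs) = (bs.dropWhile (fun b => !b)).map bitChar := by
  induction bs using List.reverseRecOn with
  | nil => simp [valB] at h
  | append_singleton bs b ih =>
    have hv := valB_append bs b
    by_cases hu : valB bs = 0
    · cases b
      · rw [hv, hu] at h; simp at h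
      · have hdw : List.dropWhile (fun b => !b) (bs ++ [true]) = [true] := by
          rw [List.dropWhile_append, if_pos]
          · rfl
          · simp only [List.isEmpty_iff, List.dropWhile_eq_nil_iff]
            intro x hx
            simp [(valB_eq_zero bs).mp hu x hx]
        rw [hv, hu, hdw]
        norm_num
        rw [binChars]
        norm_num
        rw [binChars]
        rfl
    · have hne : bs.dropWhile (fun b => !b) ≠ [] := by
        rw [Ne, List.dropWhile_eq_nil_iff]
        intro hall
        exact hu ((valB_eq_zero bs).mpr (fun x hx => by simpa using hall x hx))
      have hx0 : 2 * valB bs + cond b 1 0 ≠ 0 := by cases b <;> simp <;> omega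
      have hdiv : (2 * valB bs + cond b 1 0) / 2 = valB bs := by cases b <;> simp <;> omega
      have hmod : (2 * valB bs + cond b 1 0) % 2 = cond b 1 0 := by
        cases b <;> simp [Nat.add_mul_mod_self_left] <;> omega
      have hifn : ¬ ((List.dropWhile (fun b => !b) bs).isEmpty = true) := by simp [hne]
      rw [hv, binChars, dif_neg hx0, hdiv, hmod, ih hu, List.dropWhile_append,
        if_neg hifn, List.map_append]
      cases b <;> rfl

theorem zfill_zeros (n : Nat) (h : 1 ≤ n) :
    PySem.Chars.zfill ['0'] (n : Int) = List.replicate n '0' := by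
  rw [PySem.Chars.zfill]
  by_cases h1 : (n : Int) ≤ ([('0' : Char)] : List Char).length
  · rw [if_pos h1]
    simp only [List.length_cons, List.length_nil] at h1
    have : n = 1 := by omega
    subst this
    rfl
  · rw [if_neg h1, if_neg (by simp)]
    simp only [List.length_cons, List.length_nil, Int.toNat_natCast]
    rw [← List.replicate_succ']
    congr 1
    simp only [List.length_cons, List.length_nil, not_le] at h1
    have : 1 < n := by exact_mod_cast h1
    omega

theorem format_eq (bs : List Bool) (hne : bs ≠ []) :
    PySem.Chars.zfill (pyBin (valB bs)) (bs.length : Int) = bs.map bitChar := by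
  have hlen1 : 1 ≤ bs.length := List.length_pos_iff.mpr hne
  by_cases h0 : valB bs = 0
  · rw [pyBin, if_pos h0, zfill_zeros _ hlen1]
    symm
    rw [List.eq_replicate_iff]
    refine ⟨by simp, ?_⟩
    intro c hc
    obtain ⟨x, hx, rfl⟩ := List.mem_map.mp hc
    rw [(valB_eq_zero bs).mp h0 x hx]
    rfl
  · rw [pyBin, if_neg h0, binChars_eq bs h0]
    set dw := bs.dropWhile (fun b => !b) with hdw
    have hsuf : dw <:+ bs := List.dropWhile_suffix _
    have hldw : dw.length ≤ bs.length := List.IsSuffix.length_le hsuf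
    have hdne : dw ≠ [] := by
      rw [hdw, Ne, List.dropWhile_eq_nil_iff]
      intro hall
      exact h0 ((valB_eq_zero bs).mpr (fun x hx => by simpa using hall x hx))
    obtain ⟨c, rest, hc⟩ := List.exists_cons_of_ne_nil hdne
    have hctrue : c = true := by
      have := List.head?_dropWhile_not (fun b => !b) bs
      rw [← hdw, hc] at this
      simpa using this
    subst hctrue
    have hmapdw : dw.map bitChar = '1' :: rest.map bitChar := by rw [hc]; rfl
    rw [hmapdw, PySem.Chars.zfill]
    by_cases h1 : (bs.length : Int) ≤ (('1' : Char) :: rest.map bitChar).length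
    · rw [if_pos h1]
      simp only [List.length_cons, List.length_map] at h1
      have hlc : dw.length = rest.length + 1 := by rw [hc]; rfl
      have : dw.length = bs.length := by omega
      have hdb : dw = bs := List.IsSuffix.eq_of_length hsuf this
      rw [← hmapdw, hdb]
    · rw [if_neg h1, if_neg (by simp)]
      have htk : List.takeWhile (fun b => !b) bs ++ dw = bs := List.takeWhile_append_dropWhile
      have htkmap : (List.takeWhile (fun b => !b) bs).map bitChar
          = List.replicate (List.takeWhile (fun b => !b) bs).length '0' := by
        rw [List.eq_replicate_iff]
        refine ⟨by simp, ?_⟩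
        intro x hx
        obtain ⟨y, hy, rfl⟩ := List.mem_map.mp hx
        have := List.mem_takeWhile_imp hy
        simp only [Bool.not_eq_eq_eq_not, Bool.not_true] at this
        rw [this]
        rfl
      have hlsum : (List.takeWhile (fun b => !b) bs).length + dw.length = bs.length := by
        rw [← List.length_append, htk]
      have hlc : dw.length = rest.length + 1 := by rw [hc]; rfl
      calc List.replicate ((bs.length : Int).toNat - (('1' : Char) :: rest.map bitChar).length) '0'
            ++ ('1' : Char) :: rest.map bitChar
          = List.replicate (List.takeWhile (fun b => !b) bs).length '0' ++ dw.map bitChar := by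
            rw [hmapdw]
            simp only [Int.toNat_natCast, List.length_cons, List.length_map]
            congr 2
            omega
        _ = (List.takeWhile (fun b => !b) bs).map bitChar ++ dw.map bitChar := by rw [htkmap]
        _ = bs.map bitChar := by rw [← List.map_append, htk]

theorem nandLoop_good (b0 b1 : List Char) (hlen : b1.length = b0.length)
    (h0 : ∀ c ∈ b0, c = '0' ∨ c = '1') (h1 : ∀ c ∈ b1, c = '0' ∨ c = '1') :
    ∀ (k i : Nat) (acc : List Char), i + k = b0.length →
    nandLoop b0 b1 (PySem.List.pyRange (i : Int) (b0.length : Int)) acc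
      = some (acc ++ (nbL (b0.drop i) (b1.drop i)).flatMap blkTF) := by
  intro k
  induction k with
  | zero =>
    intro i acc hik
    rw [PySem.List.pyRange_one_eq_nil (by omega)]
    rw [List.drop_of_length_le (by omega), List.drop_of_length_le (by omega)]
    simp [nandLoop, nbL]
  | succ k ih =>
    intro i acc hik
    have hi : i < b0.length := by omega
    have hi1 : i < b1.length := by omega
    rw [PySem.List.pyRange_one_cons (by exact_mod_cast hi)]
    rw [nandLoop]
    simp only [PySem.List.pyGet?_natCast, List.getElem?_eq_getElem hi,
      List.getElem?_eq_getElem hi1, Option.getD_some]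
    rw [if_pos ⟨h0 _ (List.getElem_mem hi), h1 _ (List.getElem_mem hi1)⟩]
    rw [show ((i : Int) + 1) = ((i + 1 : Nat) : Int) by push_cast; ring]
    rw [ih (i + 1) _ (by omega)]
    rw [List.drop_eq_getElem_cons hi, List.drop_eq_getElem_cons hi1]
    simp only [nbL, List.zipWith_cons_cons, List.flatMap_cons, List.append_assoc]
    congr 2
    rcases h0 _ (List.getElem_mem hi) with hc | hc <;>
      rcases h1 _ (List.getElem_mem hi1) with hd | hd <;>
      rw [hc, hd] <;> simp [blkTF, PySem.Int.band] <;> rfl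

theorem nandLoop_bad (b0 b1 : List Char) (hlen : b1.length = b0.length) :
    ∀ (k i : Nat) (acc : List Char), i + k = b0.length →
    (∃ j, i ≤ j ∧ j < b0.length ∧
      ¬ (((b0[j]?.getD ' ') = '0' ∨ (b0[j]?.getD ' ') = '1')
        ∧ ((b1[j]?.getD ' ') = '0' ∨ (b1[j]?.getD ' ') = '1'))) →
    nandLoop b0 b1 (PySem.List.pyRange (i : Int) (b0.length : Int)) acc = none := by
  intro k
  induction k with
  | zero =>
    intro i acc hik ⟨j, hij, hj, _⟩
    omega
  | succ k ih =>
    intro i acc hik hex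
    have hi : i < b0.length := by omega
    have hi1 : i < b1.length := by omega
    rw [PySem.List.pyRange_one_cons (by exact_mod_cast hi)]
    rw [nandLoop]
    simp only [PySem.List.pyGet?_natCast]
    by_cases hcond : (((b0[(i : Nat)]?.getD ' ') = '0' ∨ (b0[(i : Nat)]?.getD ' ') = '1')
        ∧ ((b1[(i : Nat)]?.getD ' ') = '0' ∨ (b1[(i : Nat)]?.getD ' ') = '1'))
    · rw [if_pos hcond]
      rw [show ((i : Int) + 1) = ((i + 1 : Nat) : Int) by push_cast; ring]
      apply ih (i + 1) _ (by omega)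
      obtain ⟨j, hij, hj, hbad⟩ := hex
      refine ⟨j, ?_, hj, hbad⟩
      rcases Nat.eq_or_lt_of_le hij with rfl | h
      · exact absurd hcond hbad
      · omega
    · rw [if_neg hcond]

theorem nbL_eq (a : List Char) : ∀ (b : List Char),
    (List.zipWith and (a.map (· == '1')) (b.map (· == '1'))).map not = nbL a b := by
  induction a with
  | nil => intro b; simp [nbL]
  | cons c a ih =>
    intro b
    cases b with
    | nil => simp [nbL]
    | cons d b =>
      simp only [List.map_cons, List.zipWith_cons_cons, nbL] at *
      rw [ih b]

-- ===== VERDICT (by name: the statement is the Claim_ definition above) =====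
theorem nandLoop_good0 (b0 b1 : List Char) (hlen : b1.length = b0.length)
    (h0 : ∀ c ∈ b0, c = '0' ∨ c = '1') (h1 : ∀ c ∈ b1, c = '0' ∨ c = '1') :
    nandLoop b0 b1 (PySem.List.pyRange 0 (b0.length : Int)) []
      = some ((nbL b0 b1).flatMap blkTF) := by
  have := nandLoop_good b0 b1 hlen h0 h1 b0.length 0 [] (by omega)
  rwa [Nat.cast_zero, List.drop_zero, List.drop_zero, List.nil_append] at this

theorem nandLoop_bad0 (b0 b1 : List Char) (hlen : b1.length = b0.length)
    (h : ∃ j, j < b0.length ∧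
      ¬ (((b0[j]?.getD ' ') = '0' ∨ (b0[j]?.getD ' ') = '1')
        ∧ ((b1[j]?.getD ' ') = '0' ∨ (b1[j]?.getD ' ') = '1'))) :
    nandLoop b0 b1 (PySem.List.pyRange 0 (b0.length : Int)) [] = none := by
  obtain ⟨j, hj, hbad⟩ := h
  have := nandLoop_bad b0 b1 hlen b0.length 0 [] (by omega) ⟨j, Nat.zero_le _, hj, hbad⟩
  rwa [Nat.cast_zero] at this

theorem foldl_int0 (cs : List Char) :
    cs.foldl (fun v c => 2 * v + (if c = '1' then (1 : Int) else 0)) 0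
      = ((valB (cs.map (· == '1'))) : Int) := by
  have := foldl_int cs 0
  rw [Nat.cast_zero] at this
  exact this

theorem nand_core (b0 b1 : List Char) :
    (if 128 ≤ b0.length ∨ 128 ≤ b1.length then
      "Please enter two space-separated bitstrings of length < 128!"
    else if PySem.Chars.strIsdigit b0 && PySem.Chars.strIsdigit b1
        && (b0.length == b1.length) then
      match nandLoop b0 b1 (PySem.List.pyRange 0 (b0.length : Int)) [] with
      | some acc =>
          String.mk (PySem.Chars.replace (PySem.Chars.replace acc ['T', 'r', 'u', 'e'] ['1'])
            ['F', 'a', 'l', 's', 'e'] ['0'])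
      | none => "Please enter two space-separated bitstrings!"
    else "Please enter two space-separated bitstrings!")
    =
    (if 128 ≤ b0.length ∨ 128 ≤ b1.length then
      "Please enter two space-separated bitstrings of length < 128!"
    else if !(PySem.Chars.strIsdigit b0 && PySem.Chars.strIsdigit b1
        && (b0.length == b1.length)) then
      "Please enter two space-separated bitstrings!"
    else if !((b0 ++ b1).all (fun c => ['0', '1'].contains c)) then
      "Please enter two space-separated bitstrings!"
    else
      String.mk (PySem.Chars.zfill (pyBin
        (PySem.Int.band
          (Int.not (PySem.Int.band
            (b0.foldl (fun v c => 2 * v + (if c = '1' then (1 : Int) else 0)) 0)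
            (b1.foldl (fun v c => 2 * v + (if c = '1' then (1 : Int) else 0)) 0)))
          (((1 <<< b0.length : Nat) : Int) - 1)).toNat)
        (b0.length : Int))) := by
  by_cases hg : 128 ≤ b0.length ∨ 128 ≤ b1.length
  · rw [if_pos hg, if_pos hg]
  rw [if_neg hg, if_neg hg]
  by_cases hgate : (PySem.Chars.strIsdigit b0 && PySem.Chars.strIsdigit b1
      && (b0.length == b1.length)) = true
  · rw [if_pos hgate]
    simp only [hgate, Bool.not_true]
    rw [if_neg (by simp)]
    have hgate' := hgate
    rw [Bool.and_eq_true, Bool.and_eq_true, beq_iff_eq] at hgate'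
    obtain ⟨⟨hd0, hd1⟩, hlenr⟩ := hgate'
    have hlen : b1.length = b0.length := hlenr.symm
    have hb0ne : b0 ≠ [] := by
      intro hnil
      rw [hnil] at hd0
      exact absurd hd0 (by decide)
    have hn1 : 1 ≤ b0.length := List.length_pos_iff.mpr hb0ne
    by_cases hall : ((b0 ++ b1).all (fun c => ['0', '1'].contains c)) = true
    · -- both strings are 01-strings: the two algorithms compute the same bitstring
      have hgood : ∀ c ∈ b0 ++ b1, c = '0' ∨ c = '1' := by
        intro c hc
        have := List.all_eq_true.mp hall c hc
        simpa using this
      have h0 : ∀ c ∈ b0, c = '0' ∨ c = '1' :=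
        fun c hc => hgood c (List.mem_append.mpr (Or.inl hc))
      have h1 : ∀ c ∈ b1, c = '0' ∨ c = '1' :=
        fun c hc => hgood c (List.mem_append.mpr (Or.inr hc))
      rw [nandLoop_good0 b0 b1 hlen h0 h1]
      dsimp only
      rw [replace_true, replace_false]
      simp only [hall, Bool.not_true]
      rw [if_neg (by simp)]
      -- now the B side
      rw [foldl_int0 b0, foldl_int0 b1]
      set xb := b0.map (· == '1') with hxb
      set yb := b1.map (· == '1') with hyb
      have hyblen : yb.length = xb.length := by simp [hxb, hyb, hlen]
      rw [PySem.Int.band_natCast, valB_land xb yb hyblen]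
      set pand := List.zipWith and xb yb with hpand
      have hpandlen : pand.length = b0.length := by
        simp [hpand, hxb, hyb, hlen]
      have hmask : (((1 <<< b0.length : Nat) : Int) - 1) = ((2 ^ b0.length - 1 : Nat) : Int) := by
        rw [Nat.shiftLeft_eq, one_mul]
        push_cast [Nat.one_le_two_pow]
        ring
      rw [hmask, band_not_mask]
      have hplt : valB pand < 2 ^ b0.length := hpandlen ▸ valB_lt pand
      have hand : (2 ^ b0.length - 1) &&& valB pand = valB pand := by
        rw [Nat.land_comm]
        exact Nat.and_two_pow_sub_one_of_lt_two_pow hplt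
      rw [hand, Int.toNat_natCast]
      have hrval : 2 ^ b0.length - 1 - valB pand = valB (pand.map not) := by
        rw [valB_not, hpandlen]
      rw [hrval]
      have hnble : pand.map not = nbL b0 b1 := by rw [hpand, hxb, hyb, nbL_eq]
      have hnblen : (nbL b0 b1).length = b0.length := by rw [← hnble, List.length_map, hpandlen]
      have hnbne : nbL b0 b1 ≠ [] := by
        intro hnil
        rw [hnil] at hnblen
        simp at hnblen
        omega
      rw [hnble, show (b0.length : Int) = ((nbL b0 b1).length : Int) by rw [hnblen],
        format_eq _ hnbne]
    · -- some character is not 0/1: A's loop hits its early return, B's all() check fails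
      have hallf : ((b0 ++ b1).all (fun c => ['0', '1'].contains c)) = false :=
        eq_false_of_ne_true hall
      have hex : ∃ c ∈ b0 ++ b1, ¬ (c = '0' ∨ c = '1') := by
        by_contra hno
        push_neg at hno
        apply hall
        rw [List.all_eq_true]
        intro c hc
        rcases hno c hc with rfl | rfl <;> rfl
      obtain ⟨c, hcmem, hcbad⟩ := hex
      have hnone : nandLoop b0 b1 (PySem.List.pyRange 0 (b0.length : Int)) [] = none := by
        rcases List.mem_append.mp hcmem with hcb | hcb
        · obtain ⟨j, hj, rfl⟩ := List.mem_iff_getElem.mp hcb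
          refine nandLoop_bad0 b0 b1 hlen ⟨j, hj, ?_⟩
          simp only [List.getElem?_eq_getElem hj, Option.getD_some]
          intro ⟨h01, _⟩
          exact hcbad h01
        · obtain ⟨j, hj, rfl⟩ := List.mem_iff_getElem.mp hcb
          refine nandLoop_bad0 b0 b1 hlen ⟨j, by omega, ?_⟩
          simp only [List.getElem?_eq_getElem hj,
            List.getElem?_eq_getElem (show j < b1.length from hj), Option.getD_some]
          intro ⟨_, h01⟩
          exact hcbad h01
      rw [hnone]
      dsimp only
      simp only [hallf, Bool.not_false]
      rw [if_pos trivial]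
  · rw [if_neg hgate]
    have hgf : (PySem.Chars.strIsdigit b0 && PySem.Chars.strIsdigit b1
        && (b0.length == b1.length)) = false := eq_false_of_ne_true hgate
    simp only [hgf, Bool.not_false]
    rw [if_pos trivial]

theorem nand_spec : Claim_equal_nand := by
  unfold Claim_equal_nand
  intro string _ _
  unfold Spec_nand nand nand_alt
  exact nand_core ((PySem.List.pyGet? (PySem.Chars.splitOn string.toList [' ']) 0).getD [])
    ((PySem.List.pyGet? (PySem.Chars.splitOn string.toList [' ']) 1).getD [])
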